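-- pv_equiv track=rewrite | github.com/ErillLab/CAG-MD | scripts/find_pattern.py | find_direct_repeats
-- ===== SOURCE A (Python) =====
-- def find_direct_repeats(sequence, min_length=3, max_length=None):
--     """
--     Find direct repeat sequences within the given sequence.
--
--     This function searches for direct repeat sequences within the provided sequence.
--     A direct repeat sequence is a sequence that is repeated identically in the same orientation.
--
--     Parameters:
--         sequence (str): The input sequence in which to search for direct repeat sequences.
--         min_length (int): The minimum length of direct repeat sequences to search for (default is 3).
--         max_length (int): The maximum length of direct repeat sequences to search for.
--             If None, the maximum length is set to half the length of the input sequence.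
--
--     Returns:
--         list: A list of tuples containing direct repeat sequences found in the input sequence.
--             Each tuple contains the start position, repeat fragment, end position, and repeat fragment.
--     """
--
--     if max_length is None:
--         max_length = len(sequence) // 2
--
--     direct_repeats = []
--
--     for length in range(min_length, max_length + 1):
--         for i in range(len(sequence) - length + 1):
--             fragment = sequence[i:i+length]
--             for j in range(i + length, len(sequence) - length + 1):
--                 if sequence[j:j+length] == fragment:
--                     direct_repeats.append((i, fragment, j, fragment))
--
--     return direct_repeats
-- ===== SOURCE B (Python) =====
-- def _repeats_of_length(sequence, n, length):
--     # One dict-building pass groups, under each fragment, the start positions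
--     # that can be a SECOND occurrence (a later copy starts at j >= i + length
--     # with i >= 0, so only p >= length can ever be emitted); the emission then
--     # reads the later occurrences straight off the dict instead of re-slicing
--     # and comparing a substring for every pair of positions.
--     occ = {}
--     for p in range(length, n - length + 1):
--         occ.setdefault(sequence[p:p+length], []).append(p)
--     return [(i, f, j, f)
--             for i in range(n - length + 1)
--             for f in (sequence[i:i+length],)
--             for j in occ.get(f, ())
--             if j >= i + length]
--
--
-- def find_direct_repeats(sequence, min_length=3, max_length=None):
--     if max_length is None:
--         max_length = len(sequence) // 2
--     n = len(sequence)
--     return [hit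
--             for length in range(min_length, max_length + 1)
--             for hit in _repeats_of_length(sequence, n, length)]
-- ===== Notes on version B (the rewrite author's own statement) =====
-- stated objective: alternative
-- what changed: Per repeat length, B builds a dict grouping the start positions a second occurrence can take (p >= length) by fragment in one pass and emits each fragment's later occurrences read off the dict via a staged comprehension pipeline, replacing A's inner pairwise scan that re-slices and compares a substring for every pair of positions; B matches A on every input.
import Mathlib
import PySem

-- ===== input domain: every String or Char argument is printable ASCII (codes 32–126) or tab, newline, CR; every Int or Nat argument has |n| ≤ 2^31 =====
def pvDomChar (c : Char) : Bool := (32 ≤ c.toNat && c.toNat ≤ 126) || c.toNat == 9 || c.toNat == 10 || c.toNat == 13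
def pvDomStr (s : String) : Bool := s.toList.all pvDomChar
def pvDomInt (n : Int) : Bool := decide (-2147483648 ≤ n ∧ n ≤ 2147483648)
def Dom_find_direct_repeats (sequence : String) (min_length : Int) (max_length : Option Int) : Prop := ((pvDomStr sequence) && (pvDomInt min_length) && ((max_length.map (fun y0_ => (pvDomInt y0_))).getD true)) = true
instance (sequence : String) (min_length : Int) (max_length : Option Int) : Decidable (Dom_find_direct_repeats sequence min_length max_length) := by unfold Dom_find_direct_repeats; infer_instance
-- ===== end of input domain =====

-- B replaces A's inner pairwise substring-comparison scan by a per-length dict that groups,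
-- under each fragment, the start positions a second occurrence can take (p ≥ length), and a
-- comprehension that reads the later occurrences off the dict; same results in the same order.

-- ===== PORT A =====
def find_direct_repeats (sequence : String) (min_length : Int) (max_length : Option Int) : List (Int × String × Int × String) :=
  let maxL : Int :=
    match max_length with
    | none => PySem.Int.floordiv (PySem.Str.len sequence) 2
    | some m => m
  (PySem.List.pyRange min_length (maxL + 1) 1).foldl (fun acc length =>
    (PySem.List.pyRange 0 (PySem.Str.len sequence - length + 1) 1).foldl (fun acc i =>
      let fragment := PySem.Str.slice sequence (some i) (some (i + length))
      (PySem.List.pyRange (i + length) (PySem.Str.len sequence - length + 1) 1).foldl (fun acc j =>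
        if PySem.Str.slice sequence (some j) (some (j + length)) = fragment then
          acc ++ [(i, fragment, j, fragment)]
        else acc) acc) acc) []

-- ===== PORT B =====
-- helper _repeats_of_length of Source B: dict-grouping pass, then a comprehension over the groups
def repeats_of_length (sequence : String) (n length : Int) : List (Int × String × Int × String) :=
  let occ : PySem.Dict String (List Int) :=
    (PySem.List.pyRange length (n - length + 1) 1).foldl
      (fun d p => d.modify (PySem.Str.slice sequence (some p) (some (p + length))) [] (· ++ [p]))
      PySem.Dict.empty
  (PySem.List.pyRange 0 (n - length + 1) 1).flatMap (fun i =>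
    let f := PySem.Str.slice sequence (some i) (some (i + length))
    ((occ.getD f []).filter (fun j => decide (j ≥ i + length))).map (fun j => (i, f, j, f)))

def find_direct_repeats_alt (sequence : String) (min_length : Int) (max_length : Option Int) : List (Int × String × Int × String) :=
  let maxL : Int :=
    match max_length with
    | none => PySem.Int.floordiv (PySem.Str.len sequence) 2
    | some m => m
  let n : Int := PySem.Str.len sequence
  (PySem.List.pyRange min_length (maxL + 1) 1).flatMap
    (fun length => repeats_of_length sequence n length)

-- ===== PRECONDITION & SPEC =====
def Spec_find_direct_repeats (sequence : String) (min_length : Int) (max_length : Option Int) (out : List (Int × String × Int × String)) : Prop := out = find_direct_repeats_alt sequence min_length max_length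
instance (sequence : String) (min_length : Int) (max_length : Option Int) (out : List (Int × String × Int × String)) : Decidable (Spec_find_direct_repeats sequence min_length max_length out) := by unfold Spec_find_direct_repeats; infer_instance

-- ===== CLAIM (what is proved, stated in full; the proofs are below) =====
def Claim_equal_find_direct_repeats : Prop := ∀ (sequence : String) (min_length : Int) (max_length : Option Int), Dom_find_direct_repeats sequence min_length max_length → Spec_find_direct_repeats sequence min_length max_length (find_direct_repeats sequence min_length max_length)

-- ===== LEMMAS AND PROOFS =====

-- the per-length block of A's nested loops, written as a flatMap
def pvBlockA (s : String) (L : Int) : List (Int × String × Int × String) :=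
  (PySem.List.pyRange 0 (PySem.Str.len s - L + 1) 1).flatMap (fun i =>
    ((PySem.List.pyRange (i + L) (PySem.Str.len s - L + 1) 1).filter
      (fun j => decide (PySem.Str.slice s (some j) (some (j + L)) = PySem.Str.slice s (some i) (some (i + L))))).map
      (fun j => (i, PySem.Str.slice s (some i) (some (i + L)), j, PySem.Str.slice s (some i) (some (i + L)))))

-- A's length-fold is the concatenation of the per-length blocks
theorem pv_foldA_eq_flatMap (s : String) (a b : Int) (acc : List (Int × String × Int × String)) :
    (PySem.List.pyRange a b 1).foldl (fun acc length =>
      (PySem.List.pyRange 0 (PySem.Str.len s - length + 1) 1).foldl (fun acc i =>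
        let fragment := PySem.Str.slice s (some i) (some (i + length))
        (PySem.List.pyRange (i + length) (PySem.Str.len s - length + 1) 1).foldl (fun acc j =>
          if PySem.Str.slice s (some j) (some (j + length)) = fragment then
            acc ++ [(i, fragment, j, fragment)]
          else acc) acc) acc) acc
    = acc ++ (PySem.List.pyRange a b 1).flatMap (pvBlockA s) := by
  rw [← PySem.List.foldl_append_eq_flatMap]
  apply PySem.List.foldl_congr_mem
  intro acc' L _
  unfold pvBlockA
  rw [← PySem.List.foldl_append_eq_flatMap]
  apply PySem.List.foldl_congr_mem
  intro acc₂ i _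
  exact PySem.List.foldl_append_ite
    (p := fun j => PySem.Str.slice s (some j) (some (j + L)) = PySem.Str.slice s (some i) (some (i + L)))
    (f := fun j => (i, PySem.Str.slice s (some i) (some (i + L)), j, PySem.Str.slice s (some i) (some (i + L)))) _ _

-- range(lo, m) restricted to j ≥ a is range(a, m), for lo ≤ a
theorem pv_filter_le_pyRange (lo a m : Int) (ha : lo ≤ a) :
    (PySem.List.pyRange lo m 1).filter (fun j => decide (j ≥ a)) = PySem.List.pyRange a m 1 := by
  by_cases ham : a ≤ m
  · have h1 : (PySem.List.pyRange lo a 1).filter (fun j => decide (j ≥ a)) = [] := by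
      apply List.filter_eq_nil_iff.2
      intro j hj
      simp only [PySem.List.mem_pyRange_one] at hj
      simp only [ge_iff_le, decide_eq_true_eq]
      omega
    have h2 : (PySem.List.pyRange a m 1).filter (fun j => decide (j ≥ a)) = PySem.List.pyRange a m 1 := by
      apply List.filter_eq_self.2
      intro j hj
      simp only [PySem.List.mem_pyRange_one] at hj
      simp only [ge_iff_le, decide_eq_true_eq]
      omega
    rw [PySem.List.pyRange_one_append lo a m ha ham, List.filter_append, h1, h2, List.nil_append]
  · have h1 : (PySem.List.pyRange lo m 1).filter (fun j => decide (j ≥ a)) = [] := by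
      apply List.filter_eq_nil_iff.2
      intro j hj
      simp only [PySem.List.mem_pyRange_one] at hj
      simp only [ge_iff_le, decide_eq_true_eq]
      omega
    rw [h1, PySem.List.pyRange_one_eq_nil (by omega)]

-- the grouping dict looked up at any fragment yields exactly its start positions, in order
theorem pv_occ_getD (s : String) (ℓ lo m : Int) (frag : String) :
    (((PySem.List.pyRange lo m 1).foldl
        (fun d p => d.modify (PySem.Str.slice s (some p) (some (p + ℓ))) [] (· ++ [p]))
        PySem.Dict.empty).getD frag [])
      = (PySem.List.pyRange lo m 1).filter
          (fun p => PySem.Str.slice s (some p) (some (p + ℓ)) == frag) := by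
  have h := PySem.Dict.getD_foldl_modify_append
    ((PySem.List.pyRange lo m 1).map (fun p => (PySem.Str.slice s (some p) (some (p + ℓ)), p)))
    PySem.Dict.empty frag
  rw [List.foldl_map] at h
  rw [h]
  simp only [PySem.Dict.getD_empty, List.nil_append, List.filter_map, List.map_map,
    Function.comp_def]
  simp

-- for every length, A's block is exactly B's helper
theorem pv_blockA_eq (s : String) (L : Int) :
    pvBlockA s L = repeats_of_length s (PySem.Str.len s) L := by
  unfold pvBlockA repeats_of_length
  apply List.flatMap_congr
  intro i hi
  have h0i : (0:Int) ≤ i := (PySem.List.mem_pyRange_one.1 hi).1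
  simp only []
  congr 1
  rw [pv_occ_getD, List.filter_comm, pv_filter_le_pyRange L (i + L) _ (by omega)]
  apply List.filter_congr
  intro j _
  exact (Bool.beq_eq_decide_eq _ _).symm

-- ===== VERDICT (by name: the statement is the Claim_ definition above) =====
theorem find_direct_repeats_spec : Claim_equal_find_direct_repeats := by
  intro s ml mx _hdom
  unfold Spec_find_direct_repeats find_direct_repeats find_direct_repeats_alt
  cases mx with
  | none =>
      rw [pv_foldA_eq_flatMap s ml _ [], List.nil_append]
      exact List.flatMap_congr (fun L _ => pv_blockA_eq s L)
  | some m =>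
      rw [pv_foldA_eq_flatMap s ml _ [], List.nil_append]
      exact List.flatMap_congr (fun L _ => pv_blockA_eq s L)
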